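-- pv_equiv track=rewrite | github.com/BioJulia/NaturalSelection.jl | src/dnds/mutation_paths.py | helper
-- ===== SOURCE A (Python) =====
-- def helper(list_of_list):
--     ''' (list) -> (list)
--     Helper function for the div_ratio() function. Sorts a list of lists of two
--     integers. The inner lists represent the number synonymous and non-synonymous
--     mutations, where the first integer of an inner list is the amount of synonymous
--     mutations and the second is the number of non-synonymous mutations required
--     for the most probable mutation pathway between two codons. The sorting is done
--     by the following hieararchy: [1, 0], [0, 1], [2, 0], [1, 1], [0, 2], [3, 0],
--     [2, 1], [1, 2], [0, 3]. This hierarchy represents all possible substitutions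
--     between codons regarding the amount of synonymous and non-synonynmous mutations
--     required. The first list of the hierarchy is the [1, 0] list which represents
--     one synonymous and zero non-synonymous mutations. The hierarchy is continued
--     giving priority to the list with the least amount of overall nucleotide
--     substitutions (synonynmous + non-synonymous) and the least amount of
--     non-synonymous substitutions.
--     >>> helper([[1, 1], [0, 1]])
--     [[0, 1], [1, 1]]
--     >>> helper([[0, 1], [1, 0], [2, 0], [0, 2], [1, 0], [1, 1]])
--     [[1, 0], [1, 0], [0, 1], [2, 0], [1, 1], [0, 2]]
--     '''
--     a = []
--     for i in range(len(list_of_list)):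
--         if list_of_list[i] == [1, 0]:
--             a.append(list_of_list[i])
--     for i in range(len(list_of_list)):
--         if list_of_list[i] == [0, 1]:
--             a.append(list_of_list[i])
--     for i in range(len(list_of_list)):
--         if list_of_list[i] == [2, 0]:
--             a.append(list_of_list[i])
--     for i in range(len(list_of_list)):
--         if list_of_list[i] == [1, 1]:
--             a.append(list_of_list[i])
--     for i in range(len(list_of_list)):
--         if list_of_list[i] == [0, 2]:
--             a.append(list_of_list[i])
--     for i in range(len(list_of_list)):
--         if list_of_list[i] == [3, 0]:
--             a.append(list_of_list[i])
--     for i in range(len(list_of_list)):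
--         if list_of_list[i] == [2, 1]:
--             a.append(list_of_list[i])
--     for i in range(len(list_of_list)):
--         if list_of_list[i] == [1, 2]:
--             a.append(list_of_list[i])
--     for i in range(len(list_of_list)):
--         if list_of_list[i] == [0, 3]:
--             a.append(list_of_list[i])
--     return a
-- ===== SOURCE B (Python) =====
-- def helper(list_of_list):
--     order = [[1, 0], [0, 1], [2, 0], [1, 1], [0, 2], [3, 0], [2, 1], [1, 2], [0, 3]]
--     counts = {}
--     for x in list_of_list:
--         t = tuple(x)
--         counts[t] = counts.get(t, 0) + 1
--     return [list(v) for v in order for _ in range(counts.get(tuple(v), 0))]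
-- ===== Notes on version B (the rewrite author's own statement) =====
-- stated objective: alternative
-- what changed: Replaces A's nine separate scans (one per hierarchy pair) with a single counting pass into a dict plus one pass over the fixed 9-element hierarchy emitting each pair the counted number of times; same overall cost in the measurement.
import Mathlib
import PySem

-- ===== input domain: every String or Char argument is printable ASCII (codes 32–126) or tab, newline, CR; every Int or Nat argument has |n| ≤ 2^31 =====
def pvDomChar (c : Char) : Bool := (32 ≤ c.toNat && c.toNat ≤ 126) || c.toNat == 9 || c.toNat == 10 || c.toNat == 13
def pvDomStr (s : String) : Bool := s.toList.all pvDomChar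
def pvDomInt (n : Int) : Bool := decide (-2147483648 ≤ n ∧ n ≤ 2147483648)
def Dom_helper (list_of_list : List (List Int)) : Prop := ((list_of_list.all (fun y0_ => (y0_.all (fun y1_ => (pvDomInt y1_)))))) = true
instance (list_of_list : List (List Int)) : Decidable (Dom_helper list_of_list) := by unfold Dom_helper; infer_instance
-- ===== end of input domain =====

-- B trades A's nine scans for a single counting pass plus one pass over the fixed hierarchy (objective: alternative).

-- ===== PORT A =====
-- A: nine index loops over the whole list, each appending the elements equal to one hierarchy pair.
def helper (list_of_list : List (List Int)) : List (List Int) :=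
  let a : List (List Int) := []
  let a := (PySem.List.pyRange 0 (PySem.List.len list_of_list) 1).foldl
    (fun a i => if PySem.List.pyGetD list_of_list i [] = [1, 0] then a ++ [PySem.List.pyGetD list_of_list i []] else a) a
  let a := (PySem.List.pyRange 0 (PySem.List.len list_of_list) 1).foldl
    (fun a i => if PySem.List.pyGetD list_of_list i [] = [0, 1] then a ++ [PySem.List.pyGetD list_of_list i []] else a) a
  let a := (PySem.List.pyRange 0 (PySem.List.len list_of_list) 1).foldl
    (fun a i => if PySem.List.pyGetD list_of_list i [] = [2, 0] then a ++ [PySem.List.pyGetD list_of_list i []] else a) a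
  let a := (PySem.List.pyRange 0 (PySem.List.len list_of_list) 1).foldl
    (fun a i => if PySem.List.pyGetD list_of_list i [] = [1, 1] then a ++ [PySem.List.pyGetD list_of_list i []] else a) a
  let a := (PySem.List.pyRange 0 (PySem.List.len list_of_list) 1).foldl
    (fun a i => if PySem.List.pyGetD list_of_list i [] = [0, 2] then a ++ [PySem.List.pyGetD list_of_list i []] else a) a
  let a := (PySem.List.pyRange 0 (PySem.List.len list_of_list) 1).foldl
    (fun a i => if PySem.List.pyGetD list_of_list i [] = [3, 0] then a ++ [PySem.List.pyGetD list_of_list i []] else a) a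
  let a := (PySem.List.pyRange 0 (PySem.List.len list_of_list) 1).foldl
    (fun a i => if PySem.List.pyGetD list_of_list i [] = [2, 1] then a ++ [PySem.List.pyGetD list_of_list i []] else a) a
  let a := (PySem.List.pyRange 0 (PySem.List.len list_of_list) 1).foldl
    (fun a i => if PySem.List.pyGetD list_of_list i [] = [1, 2] then a ++ [PySem.List.pyGetD list_of_list i []] else a) a
  let a := (PySem.List.pyRange 0 (PySem.List.len list_of_list) 1).foldl
    (fun a i => if PySem.List.pyGetD list_of_list i [] = [0, 3] then a ++ [PySem.List.pyGetD list_of_list i []] else a) a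
  a

-- ===== PORT B =====
-- B: one pass counting each inner list (the dict keyed by the tuple of the element),
-- then one pass over the fixed hierarchy emitting each pair its counted number of times.
def helper_alt (list_of_list : List (List Int)) : List (List Int) :=
  let order : List (List Int) := [[1, 0], [0, 1], [2, 0], [1, 1], [0, 2], [3, 0], [2, 1], [1, 2], [0, 3]]
  let counts : PySem.Dict (List Int) Int :=
    list_of_list.foldl (fun d x => d.insert x (d.getD x 0 + 1)) PySem.Dict.empty
  order.flatMap (fun v => List.replicate (counts.getD v 0).toNat v)

-- ===== PRECONDITION & SPEC =====
def Spec_helper (list_of_list : List (List Int)) (out : List (List Int)) : Prop := out = helper_alt list_of_list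
instance (list_of_list : List (List Int)) (out : List (List Int)) : Decidable (Spec_helper list_of_list out) := by unfold Spec_helper; infer_instance

-- ===== CLAIM (what is proved, stated in full; the proofs are below) =====
def Claim_equal_helper : Prop := ∀ (list_of_list : List (List Int)), Dom_helper list_of_list → Spec_helper list_of_list (helper list_of_list)

-- ===== LEMMAS AND PROOFS =====

-- one of A's loops, over the elements: appends v once per occurrence of v
theorem pv_loop_eq (l : List (List Int)) (v : List Int) :
    ∀ acc : List (List Int),
      l.foldl (fun a x => if x = v then a ++ [x] else a) acc = acc ++ List.replicate (l.count v) v := by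
  induction l with
  | nil => intro acc; simp
  | cons x xs ih =>
    intro acc
    by_cases h : x = v
    · subst h
      rw [List.foldl_cons, if_pos rfl, ih, List.count_cons_self, List.append_assoc]
      simp [List.replicate_succ]
    · simp [List.foldl_cons, h, ih]

-- one of A's index loops equals appending the replicate of the count
theorem pv_pass_eq (l : List (List Int)) (v : List Int) (acc : List (List Int)) :
    (PySem.List.pyRange 0 (PySem.List.len l) 1).foldl
      (fun a i => if PySem.List.pyGetD l i [] = v then a ++ [PySem.List.pyGetD l i []] else a) acc
      = acc ++ List.replicate (l.count v) v := by
  rw [PySem.List.foldl_pyRange_zero_pyGetD l ([] : List Int)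
      (fun a x => if x = v then a ++ [x] else a) acc]
  exact pv_loop_eq l v acc

-- B's dict lookup is the count
theorem pv_counts_eq (l : List (List Int)) (v : List Int) :
    ((l.foldl (fun (d : PySem.Dict (List Int) Int) x => d.insert x (d.getD x 0 + 1)) PySem.Dict.empty).getD v 0).toNat
      = l.count v := by
  rw [PySem.Dict.foldl_insert_getD_add_one_eq_counter, PySem.Dict.getD_counter]
  simp

-- ===== VERDICT (by name: the statement is the Claim_ definition above) =====
theorem helper_spec : Claim_equal_helper := by
  unfold Claim_equal_helper
  intro l _
  unfold Spec_helper helper helper_alt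
  simp only [pv_pass_eq, List.flatMap_cons, List.flatMap_nil, pv_counts_eq]
  simp [List.append_assoc]
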